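-- pv_equiv track=rewrite | github.com/PriyankaDwivedi23/Algorithms | homework-4/headache.py | cal_headache
-- ===== SOURCE A (Python) =====
-- def match_sameLine(val1,val2):
--     '''
--     The function returns 5 if E and N are paired together else return 3
--     :param val1: person 1
--     :param val2: person 2
--     :return: headache caused to ride two persons
--     '''
--     if val1 != val2:
--         if (val1 == 'E' and val2 == 'N') or (val1 == 'N' and val2 == 'E'):
--             return 5
--     return 3
--
-- def match_differentLine(val1,val2):
--     '''
--     The function returns 5 if E and N are paired together else return 0
--     :param val1: person 1
--     :param val2: person 2
--     :return: headache caused to ride two persons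
--     '''
--     if val1 != val2:
--         if (val1 == 'E' and val2 == 'N') or (val1 == 'N' and val2 == 'E'):
--             return 5
--     return 0
--
-- def cal_headache(line1,line2,match_EN,single_person,match_sameline):
--     '''
--     The function calculates minimum headache caused to take line1 and line2 for ride
--     where following condition apply
--     1. matching E and N gives headache of 5 others as 0.
--     2. matching two people from same line is 3 or 5 if E and N otherwise 0 if other
--     line is empty.
--     3.Sending single person causes headache of 4.
--     :param line1: persons in line 1
--     :param line2: persons in line 2
--     :param match_EN: headache caused to pair E and N
--     :param single_person: headache caused to send single person
--     :param match_sameline: headache caused to send two people from same line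
--     :return: minimum headache caused by sending line1 and line2
--     Complexity : O(mn)
--     '''
--     #initialise headache to 0 for all
--     headache = [[0 for i in range(len(line2) + 1)] for j in range(len(line1) + 1)]
--     #initialise row and col
--     row  = 0
--     col =0
--     #compute headache
--     for row in range(len(line1)+1):
--         for col in range(len(line2)+1):
--             #base case if row ==0 check cost to send single person and send two person from same line
--             #take minimum of two values
--             if row == 0:
--                 if  col-1 > 0:
--                     match_pair = match_differentLine(line2[col-1],line2[col-2])
--                     headache[row][col]= min(single_person+headache[row][col-1],match_pair+headache[row][col-2])
--             # base case if col ==0 check cost to send single person and send two person from same line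
--             # take minimum of two values
--             elif col == 0:
--                 if row - 1 > 0:
--                     match_pair = match_differentLine(line1[row - 1], line1[row - 2])
--                     headache[row][col] = min(single_person + headache[row-1][col],match_pair + headache[row-2][col])
--             #check value for sending single person from both line, send one person from each line,
--             #send two persons from same line and use minimum value among that.
--             elif col-1 >= 0 and row-1 >= 0:
--                 match_pair = match_differentLine(line1[row-1],line2[col-1])
--                 headache[row][col] = min(single_person+headache[row-1][col], single_person+headache[row][col-1],match_pair+headache[row-1][col-1])
--                 if col-2 >=0:
--                     match_pair = match_sameLine(line2[col-1],line2[col-2])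
--                     headache[row][col] = min(headache[row][col] , match_pair + headache[row][col-2])
--                 if row-2 >=0:
--                     match_pair = match_sameLine(line1[row - 1], line1[row - 2])
--                     headache[row][col] = min(headache[row][col],match_pair + headache[row-2][col])
--
--     return headache[row][col]
-- ===== SOURCE B (Python) =====
-- def cal_headache(line1, line2, match_EN, single_person, match_sameline):
--     m, n = len(line1), len(line2)
--     memo = [[None] * (n + 1) for _ in range(m + 1)]
--
--     def solve(r, c):
--         v = memo[r][c]
--         if v is not None:
--             return v
--         if r == 0:
--             if c >= 2:
--                 a, b = line2[c - 1], line2[c - 2]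
--                 pair = 5 if a != b and ((a == 'E' and b == 'N') or (a == 'N' and b == 'E')) else 0
--                 u = memo[0][c - 1]
--                 w = memo[0][c - 2]
--                 res = min(single_person + (u if u is not None else solve(0, c - 1)),
--                           pair + (w if w is not None else solve(0, c - 2)))
--             else:
--                 res = 0
--         elif c == 0:
--             if r >= 2:
--                 a, b = line1[r - 1], line1[r - 2]
--                 pair = 5 if a != b and ((a == 'E' and b == 'N') or (a == 'N' and b == 'E')) else 0
--                 u = memo[r - 1][0]
--                 w = memo[r - 2][0]
--                 res = min(single_person + (u if u is not None else solve(r - 1, 0)),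
--                           pair + (w if w is not None else solve(r - 2, 0)))
--             else:
--                 res = 0
--         else:
--             a, b = line1[r - 1], line2[c - 1]
--             pair = 5 if a != b and ((a == 'E' and b == 'N') or (a == 'N' and b == 'E')) else 0
--             u = memo[r - 1][c]
--             w = memo[r][c - 1]
--             x = memo[r - 1][c - 1]
--             res = min(single_person + (u if u is not None else solve(r - 1, c)),
--                       single_person + (w if w is not None else solve(r, c - 1)),
--                       pair + (x if x is not None else solve(r - 1, c - 1)))
--             if c >= 2:
--                 a, b = line2[c - 1], line2[c - 2]
--                 pair = 5 if a != b and ((a == 'E' and b == 'N') or (a == 'N' and b == 'E')) else 3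
--                 y = memo[r][c - 2]
--                 res = min(res, pair + (y if y is not None else solve(r, c - 2)))
--             if r >= 2:
--                 a, b = line1[r - 1], line1[r - 2]
--                 pair = 5 if a != b and ((a == 'E' and b == 'N') or (a == 'N' and b == 'E')) else 3
--                 y = memo[r - 2][c]
--                 res = min(res, pair + (y if y is not None else solve(r - 2, c)))
--         memo[r][c] = res
--         return res
--
--     return solve(m, n)
-- ===== Notes on version B (the rewrite author's own statement) =====
-- stated objective: alternative
-- what changed: Replaces A's bottom-up (m+1)x(n+1) table filled row-major with in-place writes by a top-down memoized recursion solve(row, col) on the two prefix lengths, mirroring the same options and the same strict edge guards.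
import Mathlib
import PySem

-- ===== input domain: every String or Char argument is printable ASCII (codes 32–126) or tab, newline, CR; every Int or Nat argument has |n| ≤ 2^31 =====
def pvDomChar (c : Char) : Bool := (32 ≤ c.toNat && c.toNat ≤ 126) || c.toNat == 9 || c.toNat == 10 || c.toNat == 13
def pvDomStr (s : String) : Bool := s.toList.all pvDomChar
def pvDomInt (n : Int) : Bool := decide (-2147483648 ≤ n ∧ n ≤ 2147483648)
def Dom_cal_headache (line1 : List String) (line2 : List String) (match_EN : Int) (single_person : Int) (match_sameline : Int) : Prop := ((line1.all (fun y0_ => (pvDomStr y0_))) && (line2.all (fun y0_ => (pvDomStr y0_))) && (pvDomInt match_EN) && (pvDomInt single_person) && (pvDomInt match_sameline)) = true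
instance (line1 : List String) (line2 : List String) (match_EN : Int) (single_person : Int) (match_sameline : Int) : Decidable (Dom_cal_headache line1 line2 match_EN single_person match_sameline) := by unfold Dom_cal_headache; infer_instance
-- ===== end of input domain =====

-- B replaces A's bottom-up 2D table (row-major in-place fills) by a top-down recursion on the
-- two prefix lengths (memoized in Python; the memo only caches, it never changes a value, so the
-- Lean port is the same recursion without the cache): objective 'alternative', same O(mn) cost.

-- ===== PORT A =====
-- match_sameLine: 5 if the two differ and are the E/N pair, else 3
def match_sameLine (val1 : String) (val2 : String) : Int :=
  if val1 ≠ val2 then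
    (if (val1 = "E" ∧ val2 = "N") ∨ (val1 = "N" ∧ val2 = "E") then 5 else 3)
  else 3

-- match_differentLine: 5 if the two differ and are the E/N pair, else 0
def match_differentLine (val1 : String) (val2 : String) : Int :=
  if val1 ≠ val2 then
    (if (val1 = "E" ∧ val2 = "N") ∨ (val1 = "N" ∧ val2 = "E") then 5 else 0)
  else 0

-- Python 2D list read/write; in A every index used is in range, so getD 0 / set are exact here
def pvGet2 (h : List (List Int)) (r c : Nat) : Int := (h.getD r []).getD c 0
def pvSet2 (h : List (List Int)) (r c : Nat) (v : Int) : List (List Int) :=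
  h.set r ((h.getD r []).set c v)

-- literal transliteration of A: build the zero table, two nested for-loops in row-major order,
-- same branch order and the same in-place updates, finally read headache[len(line1)][len(line2)]
-- (the leftover values of the Python loop variables row, col).
def cal_headache (line1 : List String) (line2 : List String) (match_EN : Int) (single_person : Int) (match_sameline : Int) : Int :=
  let n1 := line1.length
  let n2 := line2.length
  let headache0 : List (List Int) := List.replicate (n1+1) (List.replicate (n2+1) 0)
  let final := (List.range (n1+1)).foldl (fun h row =>
    (List.range (n2+1)).foldl (fun h col =>
      if row = 0 then
        if 2 ≤ col then  -- Python: col-1 > 0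
          let match_pair := match_differentLine (line2.getD (col-1) "") (line2.getD (col-2) "")
          pvSet2 h row col (min (single_person + pvGet2 h row (col-1)) (match_pair + pvGet2 h row (col-2)))
        else h
      else if col = 0 then
        if 2 ≤ row then  -- Python: row-1 > 0
          let match_pair := match_differentLine (line1.getD (row-1) "") (line1.getD (row-2) "")
          pvSet2 h row col (min (single_person + pvGet2 h (row-1) col) (match_pair + pvGet2 h (row-2) col))
        else h
      else  -- Python: elif col-1 >= 0 and row-1 >= 0 — always true here
        let match_pair := match_differentLine (line1.getD (row-1) "") (line2.getD (col-1) "")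
        let h1 := pvSet2 h row col (min (min (single_person + pvGet2 h (row-1) col) (single_person + pvGet2 h row (col-1))) (match_pair + pvGet2 h (row-1) (col-1)))
        let h2 := if 2 ≤ col then
            let mp2 := match_sameLine (line2.getD (col-1) "") (line2.getD (col-2) "")
            pvSet2 h1 row col (min (pvGet2 h1 row col) (mp2 + pvGet2 h1 row (col-2)))
          else h1
        if 2 ≤ row then
          let mp3 := match_sameLine (line1.getD (row-1) "") (line1.getD (row-2) "")
          pvSet2 h2 row col (min (pvGet2 h2 row col) (mp3 + pvGet2 h2 (row-2) col))
        else h2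
      ) h) headache0
  pvGet2 final n1 n2

-- ===== PORT B =====
-- diff helper of Source B
def altDiff (a : String) (b : String) : Int :=
  if a ≠ b ∧ ((a = "E" ∧ b = "N") ∨ (a = "N" ∧ b = "E")) then 5 else 0

-- same helper of Source B
def altSame (a : String) (b : String) : Int :=
  if a ≠ b ∧ ((a = "E" ∧ b = "N") ∨ (a = "N" ∧ b = "E")) then 5 else 3

def altSolve (line1 : List String) (line2 : List String) (sp : Int) (r : Nat) (c : Nat) : Int :=
  if hr : r = 0 then
    if hc : 2 ≤ c then
      min (sp + altSolve line1 line2 sp 0 (c-1))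
          (altDiff (line2.getD (c-1) "") (line2.getD (c-2) "") + altSolve line1 line2 sp 0 (c-2))
    else 0
  else if hc : c = 0 then
    if hr2 : 2 ≤ r then
      min (sp + altSolve line1 line2 sp (r-1) 0)
          (altDiff (line1.getD (r-1) "") (line1.getD (r-2) "") + altSolve line1 line2 sp (r-2) 0)
    else 0
  else
    let res := min (min (sp + altSolve line1 line2 sp (r-1) c) (sp + altSolve line1 line2 sp r (c-1)))
                   (altDiff (line1.getD (r-1) "") (line2.getD (c-1) "") + altSolve line1 line2 sp (r-1) (c-1))
    let res := if h2 : 2 ≤ c then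
        min res (altSame (line2.getD (c-1) "") (line2.getD (c-2) "") + altSolve line1 line2 sp r (c-2))
      else res
    if h3 : 2 ≤ r then
      min res (altSame (line1.getD (r-1) "") (line1.getD (r-2) "") + altSolve line1 line2 sp (r-2) c)
    else res
termination_by r + c
decreasing_by all_goals omega

def cal_headache_alt (line1 : List String) (line2 : List String) (match_EN : Int) (single_person : Int) (match_sameline : Int) : Int :=
  altSolve line1 line2 single_person line1.length line2.length

-- ===== PRECONDITION & SPEC =====
def Spec_cal_headache (line1 : List String) (line2 : List String) (match_EN : Int) (single_person : Int) (match_sameline : Int) (out : Int) : Prop := out = cal_headache_alt line1 line2 match_EN single_person match_sameline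
instance (line1 : List String) (line2 : List String) (match_EN : Int) (single_person : Int) (match_sameline : Int) (out : Int) : Decidable (Spec_cal_headache line1 line2 match_EN single_person match_sameline out) := by unfold Spec_cal_headache; infer_instance

-- ===== CLAIM (what is proved, stated in full; the proofs are below) =====
def Claim_equal_cal_headache : Prop := ∀ (line1 : List String) (line2 : List String) (match_EN : Int) (single_person : Int) (match_sameline : Int), Dom_cal_headache line1 line2 match_EN single_person match_sameline → Spec_cal_headache line1 line2 match_EN single_person match_sameline (cal_headache line1 line2 match_EN single_person match_sameline)

-- ===== LEMMAS AND PROOFS =====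

-- the inner loop body of port A, named for the proofs (definitionally equal to the lambda in cal_headache)
def innerBody (line1 : List String) (line2 : List String) (single_person : Int) (row : Nat) (h : List (List Int)) (col : Nat) : List (List Int) :=
  if row = 0 then
    if 2 ≤ col then
      let match_pair := match_differentLine (line2.getD (col-1) "") (line2.getD (col-2) "")
      pvSet2 h row col (min (single_person + pvGet2 h row (col-1)) (match_pair + pvGet2 h row (col-2)))
    else h
  else if col = 0 then
    if 2 ≤ row then
      let match_pair := match_differentLine (line1.getD (row-1) "") (line1.getD (row-2) "")
      pvSet2 h row col (min (single_person + pvGet2 h (row-1) col) (match_pair + pvGet2 h (row-2) col))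
    else h
  else
    let match_pair := match_differentLine (line1.getD (row-1) "") (line2.getD (col-1) "")
    let h1 := pvSet2 h row col (min (min (single_person + pvGet2 h (row-1) col) (single_person + pvGet2 h row (col-1))) (match_pair + pvGet2 h (row-1) (col-1)))
    let h2 := if 2 ≤ col then
        let mp2 := match_sameLine (line2.getD (col-1) "") (line2.getD (col-2) "")
        pvSet2 h1 row col (min (pvGet2 h1 row col) (mp2 + pvGet2 h1 row (col-2)))
      else h1
    if 2 ≤ row then
      let mp3 := match_sameLine (line1.getD (row-1) "") (line1.getD (row-2) "")
      pvSet2 h2 row col (min (pvGet2 h2 row col) (mp3 + pvGet2 h2 (row-2) col))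
    else h2

def outerBody (line1 : List String) (line2 : List String) (single_person : Int) (h : List (List Int)) (row : Nat) : List (List Int) :=
  (List.range (line2.length+1)).foldl (innerBody line1 line2 single_person row) h

lemma cal_headache_eq (line1 line2 : List String) (men sp msl : Int) :
    cal_headache line1 line2 men sp msl =
      pvGet2 ((List.range (line1.length+1)).foldl (outerBody line1 line2 sp)
        (List.replicate (line1.length+1) (List.replicate (line2.length+1) 0))) line1.length line2.length := rfl

-- A's helper = B's helper
lemma mdiff_eq (a b : String) : match_differentLine a b = altDiff a b := by
  unfold match_differentLine altDiff; split_ifs <;> tauto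

lemma msame_eq (a b : String) : match_sameLine a b = altSame a b := by
  unfold match_sameLine altSame; split_ifs <;> tauto

-- unfolding lemmas for altSolve
lemma S_r0_lt2 (l1 l2 : List String) (sp : Int) (c : Nat) (hc : ¬ 2 ≤ c) :
    altSolve l1 l2 sp 0 c = 0 := by
  rw [altSolve]; simp [hc]

lemma S_r0 (l1 l2 : List String) (sp : Int) (c : Nat) (hc : 2 ≤ c) :
    altSolve l1 l2 sp 0 c =
      min (sp + altSolve l1 l2 sp 0 (c-1))
          (altDiff (l2.getD (c-1) "") (l2.getD (c-2) "") + altSolve l1 l2 sp 0 (c-2)) := by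
  rw [altSolve]; simp [hc]

lemma S_c0_lt2 (l1 l2 : List String) (sp : Int) (r : Nat) (hr0 : r ≠ 0) (hr : ¬ 2 ≤ r) :
    altSolve l1 l2 sp r 0 = 0 := by
  rw [altSolve]; simp [hr0, hr]

lemma S_c0 (l1 l2 : List String) (sp : Int) (r : Nat) (hr0 : r ≠ 0) (hr : 2 ≤ r) :
    altSolve l1 l2 sp r 0 =
      min (sp + altSolve l1 l2 sp (r-1) 0)
          (altDiff (l1.getD (r-1) "") (l1.getD (r-2) "") + altSolve l1 l2 sp (r-2) 0) := by
  rw [altSolve]; simp [hr0, hr]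

lemma S_main (l1 l2 : List String) (sp : Int) (r c : Nat) (hr0 : r ≠ 0) (hc0 : c ≠ 0) :
    altSolve l1 l2 sp r c =
      (let res := min (min (sp + altSolve l1 l2 sp (r-1) c) (sp + altSolve l1 l2 sp r (c-1)))
                   (altDiff (l1.getD (r-1) "") (l2.getD (c-1) "") + altSolve l1 l2 sp (r-1) (c-1));
       let res := if 2 ≤ c then
           min res (altSame (l2.getD (c-1) "") (l2.getD (c-2) "") + altSolve l1 l2 sp r (c-2))
         else res;
       if 2 ≤ r then
         min res (altSame (l1.getD (r-1) "") (l1.getD (r-2) "") + altSolve l1 l2 sp (r-2) c)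
       else res) := by
  rw [altSolve]; simp only [dif_neg hr0, dif_neg hc0]
  by_cases h2c : 2 ≤ c <;> by_cases h2r : 2 ≤ r <;> simp [h2c, h2r]

-- basic facts about the 2D helpers
lemma getD_set {α : Type} (l : List α) (i j : Nat) (x d : α) :
    (l.set i x).getD j d = if j = i ∧ i < l.length then x else l.getD j d := by
  simp only [List.getD, List.getElem?_set]
  by_cases hij : i = j
  · subst hij
    by_cases hl : i < l.length <;> simp [hl]
  · have : ¬ (j = i ∧ i < l.length) := fun hx => hij hx.1.symm
    simp [hij, this]

lemma pvSet2_length (h : List (List Int)) (r c : Nat) (v : Int) :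
    (pvSet2 h r c v).length = h.length := by
  simp [pvSet2]

lemma pvSet2_rowlen (h : List (List Int)) (r c : Nat) (v : Int) (a : Nat) :
    ((pvSet2 h r c v).getD a []).length = (h.getD a []).length := by
  unfold pvSet2
  rw [getD_set]
  split_ifs with hx
  · obtain ⟨rfl, _⟩ := hx; simp
  · rfl

lemma pvGet2_set_self (h : List (List Int)) (r c : Nat) (v : Int)
    (hr : r < h.length) (hc : c < (h.getD r []).length) :
    pvGet2 (pvSet2 h r c v) r c = v := by
  unfold pvGet2 pvSet2
  rw [getD_set, if_pos ⟨rfl, hr⟩, getD_set, if_pos ⟨rfl, hc⟩]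

lemma pvGet2_set_other (h : List (List Int)) (r c : Nat) (v : Int) (a b : Nat)
    (hne : ¬ (a = r ∧ b = c)) :
    pvGet2 (pvSet2 h r c v) a b = pvGet2 h a b := by
  unfold pvGet2 pvSet2
  rw [getD_set]
  split_ifs with hx
  · obtain ⟨rfl, hrl⟩ := hx
    rw [getD_set]
    have hbc : b ≠ c := fun hb => hne ⟨rfl, hb⟩
    simp [hbc]
  · rfl

-- the loop invariant: rows below r are fully computed, row r is computed up to column j, the rest is 0
def pvInv (l1 l2 : List String) (sp : Int) (r j : Nat) (h : List (List Int)) : Prop :=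
  h.length = l1.length + 1 ∧
  (∀ a, a < h.length → ((h.getD a []).length = l2.length + 1)) ∧
  (∀ a b, a ≤ l1.length → b ≤ l2.length →
     pvGet2 h a b = if a < r ∨ (a = r ∧ b < j) then altSolve l1 l2 sp a b else 0)

lemma inv_init (l1 l2 : List String) (sp : Int) :
    pvInv l1 l2 sp 0 0 (List.replicate (l1.length+1) (List.replicate (l2.length+1) 0)) := by
  refine ⟨by simp, ?_, ?_⟩
  · intro a ha
    simp only [List.length_replicate] at ha
    simp [List.getD, ha]
  · intro a b ha hb
    have h1 : a < l1.length + 1 := by omega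
    have h2 : b < l2.length + 1 := by omega
    rw [if_neg (by omega)]
    simp [pvGet2, List.getD, h1, h2]

lemma inv_shift (l1 l2 : List String) (sp : Int) (r : Nat) (h : List (List Int))
    (hI : pvInv l1 l2 sp r (l2.length+1) h) : pvInv l1 l2 sp (r+1) 0 h := by
  obtain ⟨h1, h2, h3⟩ := hI
  refine ⟨h1, h2, ?_⟩
  intro a b ha hb
  rw [h3 a b ha hb]
  exact if_congr (by omega) rfl rfl

-- generic foldl invariant over List.range'
lemma foldl_range'_inv {σ : Type} (f : σ → Nat → σ) (P : Nat → σ → Prop) :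
    ∀ (k j : Nat) (s : σ),
      (∀ i s', j ≤ i → i < j + k → P i s' → P (i+1) (f s' i)) →
      P j s → P (j + k) (List.foldl f s (List.range' j k)) := by
  intro k
  induction k with
  | zero => intro j s _ hP; simpa using hP
  | succ k ih =>
    intro j s hstep hP
    rw [List.range'_succ, List.foldl_cons]
    have h1 : P (j+1) (f s j) := hstep j s (le_refl j) (by omega) hP
    have h2 := ih (j+1) (f s j) (fun i s' hi hi2 => hstep i s' (by omega) (by omega)) h1
    have : j + 1 + k = j + (k + 1) := by omega
    rwa [this] at h2

-- the crux: one inner-loop step extends the invariant by one column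
lemma inner_step (l1 l2 : List String) (sp : Int) (row i : Nat) (h : List (List Int))
    (hrow : row ≤ l1.length) (hi : i ≤ l2.length) (hI : pvInv l1 l2 sp row i h) :
    pvInv l1 l2 sp row (i+1) (innerBody l1 l2 sp row h i) := by
  obtain ⟨hlen, hrows, hget⟩ := hI
  have hrlt : row < h.length := by omega
  have hclt : i < (h.getD row []).length := by rw [hrows row hrlt]; omega
  unfold innerBody
  by_cases h0 : row = 0
  · subst h0
    rw [if_pos rfl]
    by_cases h2 : 2 ≤ i
    · rw [if_pos h2]
      refine ⟨by rw [pvSet2_length]; exact hlen, ?_, ?_⟩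
      · intro a ha; rw [pvSet2_rowlen]; exact hrows a (by rwa [pvSet2_length] at ha)
      · intro a b ha hb
        by_cases hab : a = 0 ∧ b = i
        · obtain ⟨rfl, rfl⟩ := hab
          rw [pvGet2_set_self h 0 b _ hrlt hclt]
          rw [if_pos (by omega)]
          rw [hget 0 (b-1) (by omega) (by omega), hget 0 (b-2) (by omega) (by omega)]
          rw [if_pos (by omega), if_pos (by omega)]
          rw [mdiff_eq, S_r0 l1 l2 sp b h2]
        · rw [pvGet2_set_other h 0 i _ a b hab, hget a b ha hb]
          exact if_congr (by omega) rfl rfl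
    · rw [if_neg h2]
      refine ⟨hlen, hrows, ?_⟩
      intro a b ha hb
      rw [hget a b ha hb]
      by_cases hab : a = 0 ∧ b = i
      · obtain ⟨rfl, rfl⟩ := hab
        rw [if_neg (by omega), if_pos (by omega), S_r0_lt2 l1 l2 sp b h2]
      · exact if_congr (by omega) rfl rfl
  · rw [if_neg h0]
    by_cases hc0 : i = 0
    · subst hc0
      rw [if_pos rfl]
      by_cases h2 : 2 ≤ row
      · rw [if_pos h2]
        refine ⟨by rw [pvSet2_length]; exact hlen, ?_, ?_⟩
        · intro a ha; rw [pvSet2_rowlen]; exact hrows a (by rwa [pvSet2_length] at ha)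
        · intro a b ha hb
          by_cases hab : a = row ∧ b = 0
          · obtain ⟨rfl, rfl⟩ := hab
            rw [pvGet2_set_self h a 0 _ hrlt hclt]
            rw [if_pos (by omega)]
            rw [hget (a-1) 0 (by omega) (by omega), hget (a-2) 0 (by omega) (by omega)]
            rw [if_pos (by omega), if_pos (by omega)]
            rw [mdiff_eq, S_c0 l1 l2 sp a h0 h2]
          · rw [pvGet2_set_other h row 0 _ a b hab, hget a b ha hb]
            exact if_congr (by omega) rfl rfl
      · rw [if_neg h2]
        refine ⟨hlen, hrows, ?_⟩
        intro a b ha hb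
        rw [hget a b ha hb]
        by_cases hab : a = row ∧ b = 0
        · obtain ⟨rfl, rfl⟩ := hab
          rw [if_neg (by omega), if_pos (by omega), S_c0_lt2 l1 l2 sp a h0 h2]
        · exact if_congr (by omega) rfl rfl
    · rw [if_neg hc0]
      -- the general cell: a chain of up to three writes to (row, i)
      have hv1 : pvGet2 h (row-1) i = altSolve l1 l2 sp (row-1) i := by
        rw [hget (row-1) i (by omega) hi, if_pos (by omega)]
      have hv2 : pvGet2 h row (i-1) = altSolve l1 l2 sp row (i-1) := by
        rw [hget row (i-1) hrow (by omega), if_pos (by omega)]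
      have hv3 : pvGet2 h (row-1) (i-1) = altSolve l1 l2 sp (row-1) (i-1) := by
        rw [hget (row-1) (i-1) (by omega) (by omega), if_pos (by omega)]
      by_cases h2c : 2 ≤ i
      · by_cases h2r : 2 ≤ row
        · -- both same-line pairs available: three writes
          simp only [if_pos h2c, if_pos h2r]
          set v1 := min (min (sp + pvGet2 h (row-1) i) (sp + pvGet2 h row (i-1))) (match_differentLine (l1.getD (row-1) "") (l2.getD (i-1) "") + pvGet2 h (row-1) (i-1)) with hv1def
          set t1 := pvSet2 h row i v1 with ht1
          have hS1 : v1 = min (min (sp + altSolve l1 l2 sp (row-1) i) (sp + altSolve l1 l2 sp row (i-1))) (altDiff (l1.getD (row-1) "") (l2.getD (i-1) "") + altSolve l1 l2 sp (row-1) (i-1)) := by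
            rw [hv1def, hv1, hv2, hv3, mdiff_eq]
          have ht1rl : ∀ a, ((t1.getD a []).length) = (h.getD a []).length := fun a => pvSet2_rowlen _ _ _ _ _
          have ht1self : pvGet2 t1 row i = v1 := pvGet2_set_self h row i v1 hrlt hclt
          have ht1other : ∀ a b, ¬ (a = row ∧ b = i) → pvGet2 t1 a b = pvGet2 h a b :=
            fun a b hab => pvGet2_set_other h row i v1 a b hab
          have ht1len : t1.length = h.length := pvSet2_length _ _ _ _
          have hrlt1 : row < t1.length := by rw [ht1len]; omega
          have hclt1 : i < (t1.getD row []).length := by rw [ht1rl]; exact hclt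
          set v2 := min (pvGet2 t1 row i) (match_sameLine (l2.getD (i-1) "") (l2.getD (i-2) "") + pvGet2 t1 row (i-2)) with hv2def
          set t2 := pvSet2 t1 row i v2 with ht2
          have hS2 : v2 = min v1 (altSame (l2.getD (i-1) "") (l2.getD (i-2) "") + altSolve l1 l2 sp row (i-2)) := by
            rw [hv2def, ht1self, ht1other row (i-2) (by omega), hget row (i-2) hrow (by omega), if_pos (by omega), msame_eq]
          have ht2rl : ∀ a, ((t2.getD a []).length) = (t1.getD a []).length := fun a => pvSet2_rowlen _ _ _ _ _
          have ht2self : pvGet2 t2 row i = v2 := pvGet2_set_self t1 row i v2 hrlt1 hclt1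
          have ht2other : ∀ a b, ¬ (a = row ∧ b = i) → pvGet2 t2 a b = pvGet2 t1 a b :=
            fun a b hab => pvGet2_set_other t1 row i v2 a b hab
          have ht2len : t2.length = t1.length := pvSet2_length _ _ _ _
          set v3 := min (pvGet2 t2 row i) (match_sameLine (l1.getD (row-1) "") (l1.getD (row-2) "") + pvGet2 t2 (row-2) i) with hv3def
          have hS3 : v3 = min v2 (altSame (l1.getD (row-1) "") (l1.getD (row-2) "") + altSolve l1 l2 sp (row-2) i) := by
            rw [hv3def, ht2self, ht2other (row-2) i (by omega), ht1other (row-2) i (by omega), hget (row-2) i (by omega) hi, if_pos (by omega), msame_eq]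
          refine ⟨by rw [pvSet2_length, ht2len, ht1len]; exact hlen, ?_, ?_⟩
          · intro a ha
            rw [pvSet2_rowlen, ht2rl, ht1rl]
            exact hrows a (by rw [pvSet2_length, ht2len, ht1len] at ha; omega)
          · intro a b ha hb
            by_cases hab : a = row ∧ b = i
            · obtain ⟨rfl, rfl⟩ := hab
              rw [pvGet2_set_self t2 a b v3 (by rw [ht2len, ht1len]; omega) (by rw [ht2rl, ht1rl]; exact hclt)]
              rw [if_pos (by omega)]
              rw [S_main l1 l2 sp a b h0 hc0]
              simp only [if_pos h2c, if_pos h2r]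
              rw [hS3, hS2, hS1]
            · rw [pvGet2_set_other t2 row i v3 a b hab, ht2other a b hab, ht1other a b hab, hget a b ha hb]
              exact if_congr (by omega) rfl rfl
        · -- 2 ≤ i, row = 1: two writes
          simp only [if_pos h2c, if_neg h2r]
          set v1 := min (min (sp + pvGet2 h (row-1) i) (sp + pvGet2 h row (i-1))) (match_differentLine (l1.getD (row-1) "") (l2.getD (i-1) "") + pvGet2 h (row-1) (i-1)) with hv1def
          set t1 := pvSet2 h row i v1 with ht1
          have hS1 : v1 = min (min (sp + altSolve l1 l2 sp (row-1) i) (sp + altSolve l1 l2 sp row (i-1))) (altDiff (l1.getD (row-1) "") (l2.getD (i-1) "") + altSolve l1 l2 sp (row-1) (i-1)) := by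
            rw [hv1def, hv1, hv2, hv3, mdiff_eq]
          have ht1rl : ∀ a, ((t1.getD a []).length) = (h.getD a []).length := fun a => pvSet2_rowlen _ _ _ _ _
          have ht1self : pvGet2 t1 row i = v1 := pvGet2_set_self h row i v1 hrlt hclt
          have ht1other : ∀ a b, ¬ (a = row ∧ b = i) → pvGet2 t1 a b = pvGet2 h a b :=
            fun a b hab => pvGet2_set_other h row i v1 a b hab
          have ht1len : t1.length = h.length := pvSet2_length _ _ _ _
          have hrlt1 : row < t1.length := by rw [ht1len]; omega
          have hclt1 : i < (t1.getD row []).length := by rw [ht1rl]; exact hclt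
          set v2 := min (pvGet2 t1 row i) (match_sameLine (l2.getD (i-1) "") (l2.getD (i-2) "") + pvGet2 t1 row (i-2)) with hv2def
          have hS2 : v2 = min v1 (altSame (l2.getD (i-1) "") (l2.getD (i-2) "") + altSolve l1 l2 sp row (i-2)) := by
            rw [hv2def, ht1self, ht1other row (i-2) (by omega), hget row (i-2) hrow (by omega), if_pos (by omega), msame_eq]
          refine ⟨by rw [pvSet2_length, ht1len]; exact hlen, ?_, ?_⟩
          · intro a ha
            rw [pvSet2_rowlen, ht1rl]
            exact hrows a (by rw [pvSet2_length, ht1len] at ha; omega)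
          · intro a b ha hb
            by_cases hab : a = row ∧ b = i
            · obtain ⟨rfl, rfl⟩ := hab
              rw [pvGet2_set_self t1 a b v2 hrlt1 hclt1]
              rw [if_pos (by omega)]
              rw [S_main l1 l2 sp a b h0 hc0]
              simp only [if_pos h2c, if_neg h2r]
              rw [hS2, hS1]
            · rw [pvGet2_set_other t1 row i v2 a b hab, ht1other a b hab, hget a b ha hb]
              exact if_congr (by omega) rfl rfl
      · by_cases h2r : 2 ≤ row
        · -- i = 1, 2 ≤ row: two writes
          simp only [if_neg h2c, if_pos h2r]
          set v1 := min (min (sp + pvGet2 h (row-1) i) (sp + pvGet2 h row (i-1))) (match_differentLine (l1.getD (row-1) "") (l2.getD (i-1) "") + pvGet2 h (row-1) (i-1)) with hv1def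
          set t1 := pvSet2 h row i v1 with ht1
          have hS1 : v1 = min (min (sp + altSolve l1 l2 sp (row-1) i) (sp + altSolve l1 l2 sp row (i-1))) (altDiff (l1.getD (row-1) "") (l2.getD (i-1) "") + altSolve l1 l2 sp (row-1) (i-1)) := by
            rw [hv1def, hv1, hv2, hv3, mdiff_eq]
          have ht1rl : ∀ a, ((t1.getD a []).length) = (h.getD a []).length := fun a => pvSet2_rowlen _ _ _ _ _
          have ht1self : pvGet2 t1 row i = v1 := pvGet2_set_self h row i v1 hrlt hclt
          have ht1other : ∀ a b, ¬ (a = row ∧ b = i) → pvGet2 t1 a b = pvGet2 h a b :=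
            fun a b hab => pvGet2_set_other h row i v1 a b hab
          have ht1len : t1.length = h.length := pvSet2_length _ _ _ _
          have hrlt1 : row < t1.length := by rw [ht1len]; omega
          have hclt1 : i < (t1.getD row []).length := by rw [ht1rl]; exact hclt
          set v3 := min (pvGet2 t1 row i) (match_sameLine (l1.getD (row-1) "") (l1.getD (row-2) "") + pvGet2 t1 (row-2) i) with hv3def
          have hS3 : v3 = min v1 (altSame (l1.getD (row-1) "") (l1.getD (row-2) "") + altSolve l1 l2 sp (row-2) i) := by
            rw [hv3def, ht1self, ht1other (row-2) i (by omega), hget (row-2) i (by omega) hi, if_pos (by omega), msame_eq]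
          refine ⟨by rw [pvSet2_length, ht1len]; exact hlen, ?_, ?_⟩
          · intro a ha
            rw [pvSet2_rowlen, ht1rl]
            exact hrows a (by rw [pvSet2_length, ht1len] at ha; omega)
          · intro a b ha hb
            by_cases hab : a = row ∧ b = i
            · obtain ⟨rfl, rfl⟩ := hab
              rw [pvGet2_set_self t1 a b v3 hrlt1 hclt1]
              rw [if_pos (by omega)]
              rw [S_main l1 l2 sp a b h0 hc0]
              simp only [if_neg h2c, if_pos h2r]
              rw [hS3, hS1]
            · rw [pvGet2_set_other t1 row i v3 a b hab, ht1other a b hab, hget a b ha hb]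
              exact if_congr (by omega) rfl rfl
        · -- i = 1, row = 1: one write
          simp only [if_neg h2c, if_neg h2r]
          set v1 := min (min (sp + pvGet2 h (row-1) i) (sp + pvGet2 h row (i-1))) (match_differentLine (l1.getD (row-1) "") (l2.getD (i-1) "") + pvGet2 h (row-1) (i-1)) with hv1def
          set t1 := pvSet2 h row i v1 with ht1
          have hS1 : v1 = min (min (sp + altSolve l1 l2 sp (row-1) i) (sp + altSolve l1 l2 sp row (i-1))) (altDiff (l1.getD (row-1) "") (l2.getD (i-1) "") + altSolve l1 l2 sp (row-1) (i-1)) := by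
            rw [hv1def, hv1, hv2, hv3, mdiff_eq]
          have ht1rl : ∀ a, ((t1.getD a []).length) = (h.getD a []).length := fun a => pvSet2_rowlen _ _ _ _ _
          have ht1self : pvGet2 t1 row i = v1 := pvGet2_set_self h row i v1 hrlt hclt
          have ht1other : ∀ a b, ¬ (a = row ∧ b = i) → pvGet2 t1 a b = pvGet2 h a b :=
            fun a b hab => pvGet2_set_other h row i v1 a b hab
          have ht1len : t1.length = h.length := pvSet2_length _ _ _ _
          refine ⟨by rw [ht1len]; exact hlen, ?_, ?_⟩
          · intro a ha
            rw [ht1rl]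
            exact hrows a (by rw [ht1len] at ha; omega)
          · intro a b ha hb
            by_cases hab : a = row ∧ b = i
            · obtain ⟨rfl, rfl⟩ := hab
              rw [ht1self, if_pos (by omega)]
              rw [S_main l1 l2 sp a b h0 hc0]
              simp only [if_neg h2c, if_neg h2r]
              rw [hS1]
            · rw [ht1other a b hab, hget a b ha hb]
              exact if_congr (by omega) rfl rfl

lemma outer_step (l1 l2 : List String) (sp : Int) (row : Nat) (h : List (List Int))
    (hrow : row ≤ l1.length) (hI : pvInv l1 l2 sp row 0 h) :
    pvInv l1 l2 sp (row+1) 0 (outerBody l1 l2 sp h row) := by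
  apply inv_shift
  unfold outerBody
  rw [List.range_eq_range']
  have := foldl_range'_inv (innerBody l1 l2 sp row) (fun j s => pvInv l1 l2 sp row j s)
    (l2.length+1) 0 h (fun i s' _ hi hP => inner_step l1 l2 sp row i s' hrow (by omega) hP) hI
  simpa using this

lemma outer_all (l1 l2 : List String) (sp : Int) :
    pvInv l1 l2 sp (l1.length+1) 0
      ((List.range (l1.length+1)).foldl (outerBody l1 l2 sp)
        (List.replicate (l1.length+1) (List.replicate (l2.length+1) 0))) := by
  rw [List.range_eq_range']
  have := foldl_range'_inv (outerBody l1 l2 sp) (fun j s => pvInv l1 l2 sp j 0 s)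
    (l1.length+1) 0 _ (fun i s' _ hi hP => outer_step l1 l2 sp i s' (by omega) hP)
    (inv_init l1 l2 sp)
  simpa using this


-- ===== VERDICT (by name: the statement is the Claim_ definition above) =====
theorem cal_headache_spec : Claim_equal_cal_headache := by
  intro line1 line2 match_EN single_person match_sameline _
  show cal_headache line1 line2 match_EN single_person match_sameline
      = cal_headache_alt line1 line2 match_EN single_person match_sameline
  rw [cal_headache_eq line1 line2 match_EN single_person match_sameline]
  obtain ⟨_, _, hget⟩ := outer_all line1 line2 single_person
  rw [hget line1.length line2.length (le_refl _) (le_refl _), if_pos (by omega)]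
  rfl
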